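-- pv_equiv track=rewrite | github.com/Manjesh80/googly | EPI/recursion/recursion_works.py | generate_power_subset_manjesh
-- ===== SOURCE A (Python) =====
-- def generate_power_subset_manjesh(A):
--     def generate_power_subset_by_offset(anchor, offset, size):
--         if offset + size > len(A):
--             return
--         else:
--             results.append(list(A[anchor:anchor + 1] + A[offset: offset + size]))
--         generate_power_subset_by_offset(anchor, offset + 1, size)
--
--     def generate_power_subset_anchor(anchor):
--         if anchor > len(A):
--             return
--         for size in range(1, len(A)):
--             generate_power_subset_by_offset(anchor, anchor + 1, size)
--         generate_power_subset_anchor(anchor + 1)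
--
--     results = []
--     generate_power_subset_anchor(0)
--     return results
-- ===== SOURCE B (Python) =====
-- def generate_power_subset_manjesh(A):
--     results = []
--     for anchor in range(len(A) + 1):
--         for size in range(1, len(A)):
--             for offset in range(anchor + 1, len(A) - size + 1):
--                 results.append(list(A[anchor:anchor + 1] + A[offset:offset + size]))
--     return results
-- ===== Notes on version B (the rewrite author's own statement) =====
-- stated objective: simpler
-- what changed: Replaced A's two layered recursive helpers mutating a closed-over results list with three explicit nested range loops appending in the same enumeration order.
import Mathlib
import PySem

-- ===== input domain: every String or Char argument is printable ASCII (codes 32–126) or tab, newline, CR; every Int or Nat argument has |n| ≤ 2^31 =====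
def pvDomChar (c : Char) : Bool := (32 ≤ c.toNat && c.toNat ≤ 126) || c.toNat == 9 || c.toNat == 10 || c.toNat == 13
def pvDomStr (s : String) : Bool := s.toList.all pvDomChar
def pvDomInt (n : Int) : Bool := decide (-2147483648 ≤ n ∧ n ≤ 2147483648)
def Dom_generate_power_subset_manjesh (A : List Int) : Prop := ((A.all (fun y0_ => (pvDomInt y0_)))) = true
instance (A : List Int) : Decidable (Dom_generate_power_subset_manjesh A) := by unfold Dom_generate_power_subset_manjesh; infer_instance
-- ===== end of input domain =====

-- B replaces A's two mutually layered recursive helpers by three explicit nested loops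
-- preserving the same enumeration order (objective: simpler).

-- ===== PORT A =====
-- A's inner recursive helper generate_power_subset_by_offset (results threaded as acc)
def pvOffsetLoop (A : List Int) (anchor offset size : Int) (acc : List (List Int)) :
    List (List Int) :=
  if offset + size > (A.length : Int) then acc
  else
    pvOffsetLoop A anchor (offset + 1) size
      (acc ++ [PySem.List.slice A (some anchor) (some (anchor + 1)) ++
               PySem.List.slice A (some offset) (some (offset + size))])
termination_by ((A.length : Int) + 1 - (offset + size)).toNat
decreasing_by omega

-- A's outer recursive helper generate_power_subset_anchor
def pvAnchorLoop (A : List Int) (anchor : Int) (acc : List (List Int)) : List (List Int) :=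
  if anchor > (A.length : Int) then acc
  else
    pvAnchorLoop A (anchor + 1)
      ((PySem.List.pyRange 1 (A.length : Int) 1).foldl
        (fun ac size => pvOffsetLoop A anchor (anchor + 1) size ac) acc)
termination_by ((A.length : Int) + 1 - anchor).toNat
decreasing_by omega

def generate_power_subset_manjesh (A : List Int) : List (List Int) :=
  pvAnchorLoop A 0 []

-- ===== PORT B =====
def generate_power_subset_manjesh_alt (A : List Int) : List (List Int) :=
  (PySem.List.pyRange 0 ((A.length : Int) + 1) 1).foldl
    (fun acc anchor =>
      (PySem.List.pyRange 1 (A.length : Int) 1).foldl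
        (fun ac size =>
          (PySem.List.pyRange (anchor + 1) ((A.length : Int) - size + 1) 1).foldl
            (fun a3 offset =>
              a3 ++ [PySem.List.slice A (some anchor) (some (anchor + 1)) ++
                     PySem.List.slice A (some offset) (some (offset + size))]) ac) acc) []

-- ===== PRECONDITION & SPEC =====
def Spec_generate_power_subset_manjesh (A : List Int) (out : List (List Int)) : Prop := out = generate_power_subset_manjesh_alt A
instance (A : List Int) (out : List (List Int)) : Decidable (Spec_generate_power_subset_manjesh A out) := by unfold Spec_generate_power_subset_manjesh; infer_instance

-- ===== CLAIM (what is proved, stated in full; the proofs are below) =====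
def Claim_equal_generate_power_subset_manjesh : Prop := ∀ (A : List Int), Dom_generate_power_subset_manjesh A → Spec_generate_power_subset_manjesh A (generate_power_subset_manjesh A)

-- ===== LEMMAS AND PROOFS =====

-- A's offset recursion is B's offset loop (a foldl over pyRange)
theorem pvOffsetLoop_eq (A : List Int) (anchor size : Int) :
    ∀ (offset : Int) (acc : List (List Int)),
      pvOffsetLoop A anchor offset size acc =
        (PySem.List.pyRange offset ((A.length : Int) - size + 1) 1).foldl
          (fun a3 off =>
            a3 ++ [PySem.List.slice A (some anchor) (some (anchor + 1)) ++
                   PySem.List.slice A (some off) (some (off + size))]) acc := by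
  intro offset acc
  induction offset, acc using pvOffsetLoop.induct A anchor size with
  | case1 offset acc h =>
      rw [pvOffsetLoop, if_pos h,
        PySem.List.pyRange_one_eq_nil (a := offset) (b := (A.length : Int) - size + 1)
          (by omega)]
      rfl
  | case2 offset acc h ih =>
      conv_rhs => rw [PySem.List.pyRange_one_cons (a := offset)
        (b := (A.length : Int) - size + 1) (by omega)]
      simp only [List.foldl_cons]
      rw [pvOffsetLoop, if_neg h]
      exact ih

-- A's anchor recursion is B's outer foldl over pyRange
theorem pvAnchorLoop_eq (A : List Int) :
    ∀ (anchor : Int) (acc : List (List Int)),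
      pvAnchorLoop A anchor acc =
        (PySem.List.pyRange anchor ((A.length : Int) + 1) 1).foldl
          (fun acc' a =>
            (PySem.List.pyRange 1 (A.length : Int) 1).foldl
              (fun ac size => pvOffsetLoop A a (a + 1) size ac) acc') acc := by
  intro anchor acc
  induction anchor, acc using pvAnchorLoop.induct A with
  | case1 anchor acc h =>
      rw [pvAnchorLoop, if_pos h,
        PySem.List.pyRange_one_eq_nil (a := anchor) (b := (A.length : Int) + 1) (by omega)]
      rfl
  | case2 anchor acc h ih =>
      conv_rhs => rw [PySem.List.pyRange_one_cons (a := anchor)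
        (b := (A.length : Int) + 1) (by omega)]
      simp only [List.foldl_cons]
      rw [pvAnchorLoop, if_neg h]
      exact ih

-- ===== VERDICT (by name: the statement is the Claim_ definition above) =====
theorem generate_power_subset_manjesh_spec : Claim_equal_generate_power_subset_manjesh := by
  intro A _
  show generate_power_subset_manjesh A = generate_power_subset_manjesh_alt A
  rw [generate_power_subset_manjesh, pvAnchorLoop_eq]
  unfold generate_power_subset_manjesh_alt
  congr 1
  funext acc' a
  congr 1
  funext ac size
  exact pvOffsetLoop_eq A a size (a + 1) ac
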